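-- pv_equiv track=rewrite | github.com/mila-klimovich/DI-Bootcamp | week2/day4/dailyChallenge/challenge.py | decrypt_matrix
-- ===== SOURCE A (Python) =====
-- def decrypt_matrix(matrix):
--     rows = len(matrix)
--     columns = len(matrix[0])
--     result = ""
--
--     for c in range(columns):
--         for r in range(rows):
--             char = matrix[r][c]
--             if char.isalpha():
--                 result += char
--             elif len(result) and result[-1] != " ":
--                 result += " "
--
--     return result
-- ===== SOURCE B (Python) =====
-- def decrypt_matrix(matrix):
--     columns = len(matrix[0])
--     cells = [row[c] for c in range(columns) for row in matrix]
--     parts = []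
--     i, n = 0, len(cells)
--     while i < n:
--         if cells[i].isalpha():
--             j = i
--             while j < n and cells[j].isalpha():
--                 j += 1
--             parts.append(''.join(cells[i:j]))
--             i = j
--         else:
--             parts.append(' ')
--             while i < n and not cells[i].isalpha():
--                 i += 1
--     return ''.join(parts).lstrip()
-- ===== Notes on version B (the rewrite author's own statement) =====
-- stated objective: idiomatic
-- what changed: B flattens the matrix column-major into one cell list and then emits one part per run (alpha runs joined, each non-alpha run a single space) with a final lstrip, replacing A's interleaved stateful append that inspects the last character of the growing result.
import Mathlib
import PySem

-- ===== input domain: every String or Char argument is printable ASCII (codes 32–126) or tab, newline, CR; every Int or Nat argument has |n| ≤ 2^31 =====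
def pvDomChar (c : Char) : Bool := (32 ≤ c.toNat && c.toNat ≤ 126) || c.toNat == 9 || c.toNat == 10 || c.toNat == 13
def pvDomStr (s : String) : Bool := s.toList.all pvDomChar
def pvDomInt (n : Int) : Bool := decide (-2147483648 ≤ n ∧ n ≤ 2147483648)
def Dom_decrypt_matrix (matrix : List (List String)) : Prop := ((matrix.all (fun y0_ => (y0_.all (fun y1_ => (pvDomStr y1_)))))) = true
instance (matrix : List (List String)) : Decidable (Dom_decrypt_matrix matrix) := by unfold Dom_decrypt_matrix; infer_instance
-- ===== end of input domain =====

-- B reads the matrix column-major into one flat cell list and then emits one part per run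
-- (an alpha run joined, a non-alpha run as a single space), instead of A's interleaved
-- stateful character-by-character append (objective: idiomatic; return value only).

-- ===== PORT A =====
-- loop body of A: append an alpha cell; else append ' ' if result is nonempty and does not end in ' '
def pvStepA (result : List Char) (char : String) : List Char :=
  if PySem.Str.strIsalpha char then result ++ char.toList
  else if result ≠ [] ∧ PySem.List.pyGet? result (-1) ≠ some ' ' then result ++ [' ']
  else result

def decrypt_matrix (matrix : List (List String)) : String :=
  let rows := PySem.List.len matrix
  let columns := PySem.List.len (PySem.List.pyGetD matrix 0 [])  -- len(matrix[0]); Pre_ excludes [] where Python raises IndexError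
  String.ofList ((PySem.List.pyRange 0 columns).foldl (fun result c =>
    (PySem.List.pyRange 0 rows).foldl (fun result r =>
      pvStepA result (PySem.List.pyGetD (PySem.List.pyGetD matrix r []) c "")) result) [])

-- ===== PORT B =====
-- Source B's run scanner: an alpha run becomes its join, a non-alpha run a single " ";
-- the inner `while` scans of Source B are the takeWhile/dropWhile of the run's predicate.
def pvRunsB : List String → List (List Char)
  | [] => []
  | x :: xs =>
    if PySem.Str.strIsalpha x then
      ((x :: xs.takeWhile (fun s => PySem.Str.strIsalpha s)).flatMap String.toList)
        :: pvRunsB (xs.dropWhile (fun s => PySem.Str.strIsalpha s))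
    else
      [' '] :: pvRunsB (xs.dropWhile (fun s => !PySem.Str.strIsalpha s))
  termination_by l => l.length
  decreasing_by
  · exact Nat.lt_succ_of_le (List.length_dropWhile_le _ _)
  · exact Nat.lt_succ_of_le (List.length_dropWhile_le _ _)

def decrypt_matrix_alt (matrix : List (List String)) : String :=
  let columns := PySem.List.len (PySem.List.pyGetD matrix 0 [])  -- len(matrix[0]); Pre_ excludes [] where Python raises IndexError
  let cells := (PySem.List.pyRange 0 columns).flatMap (fun c => matrix.map (fun row => PySem.List.pyGetD row c ""))
  String.ofList (PySem.Chars.lstrip ((pvRunsB cells).flatMap id))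

-- ===== PRECONDITION & SPEC =====
-- Pre_ excludes exactly the inputs where Python A raises IndexError: the empty matrix
-- (len(matrix[0])) and ragged matrices with a row shorter than the first row.
def Pre_decrypt_matrix (matrix : List (List String)) : Prop :=
  matrix ≠ [] ∧ ∀ row ∈ matrix, (matrix.headD []).length ≤ row.length
instance (matrix : List (List String)) : Decidable (Pre_decrypt_matrix matrix) := by
  unfold Pre_decrypt_matrix; infer_instance

def pvWitness_decrypt_matrix : List (List String) := [["a", "1"], ["b", "c"]]

def Spec_decrypt_matrix (matrix : List (List String)) (out : String) : Prop := out = decrypt_matrix_alt matrix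
instance (matrix : List (List String)) (out : String) : Decidable (Spec_decrypt_matrix matrix out) := by unfold Spec_decrypt_matrix; infer_instance

-- ===== CLAIM (what is proved, stated in full; the proofs are below) =====
def Claim_equal_decrypt_matrix : Prop := ∀ (matrix : List (List String)), Dom_decrypt_matrix matrix → Pre_decrypt_matrix matrix → Spec_decrypt_matrix matrix (decrypt_matrix matrix)

-- ===== LEMMAS AND PROOFS =====

-- the common run view of the output: flag = "a space may be emitted here"
-- (on A's side: result is nonempty and does not end in ' ')
def pvRuns (flag : Bool) : List String → List Char
  | [] => []
  | x :: xs =>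
    if PySem.Str.strIsalpha x then x.toList ++ pvRuns true xs
    else if flag then ' ' :: pvRuns false xs
    else pvRuns false xs

lemma pvGet_neg_one (xs : List Char) : PySem.List.pyGet? xs (-1) = xs.getLast? := by
  cases xs with
  | nil => simp [PySem.List.pyGet?, PySem.List.pyIdx?]
  | cons a l =>
    simp only [PySem.List.pyGet?, PySem.List.pyIdx?, List.length_cons]
    norm_num
    rw [List.getLast?_eq_getElem?]
    simp

lemma pvAlphaRange {c : Char} (h : PySem.Chars.isalpha c = true) :
    65 ≤ c.toNat ∧ c.toNat ≤ 90 ∨ 97 ≤ c.toNat ∧ c.toNat ≤ 122 := by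
  simp only [PySem.Chars.isalpha, PySem.Chars.isupper, PySem.Chars.islower, Bool.or_eq_true,
    Bool.and_eq_true, decide_eq_true_eq, Char.le_def, UInt32.le_iff_toNat_le, Char.toNat] at h ⊢
  exact h

lemma pvAlpha_ne_space {c : Char} (h : PySem.Chars.isalpha c = true) : c ≠ ' ' := by
  rintro rfl
  have := pvAlphaRange h
  revert this; decide

lemma pvFoldA (cells : List String) : ∀ (res : List Char),
    cells.foldl pvStepA res
      = res ++ pvRuns (decide (res ≠ [] ∧ PySem.List.pyGet? res (-1) ≠ some ' ')) cells := by
  induction cells with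
  | nil => intro res; simp [pvRuns]
  | cons x xs ih =>
    intro res
    by_cases hx : PySem.Chars.strIsalpha x.toList = true
    · have hne : x.toList ≠ [] := by
        simp only [PySem.Chars.strIsalpha, Bool.and_eq_true,
          Bool.not_eq_eq_eq_not, Bool.not_true, List.isEmpty_eq_false_iff] at hx
        exact hx.1
      have hall : ∀ c ∈ x.toList, PySem.Chars.isalpha c = true := by
        simp only [PySem.Chars.strIsalpha, Bool.and_eq_true,
          List.all_eq_true] at hx
        exact hx.2
      have hlast : (res ++ x.toList).getLast? ≠ some ' ' := by
        rw [List.getLast?_append_of_ne_nil _ hne]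
        intro hc
        have hmem : x.toList.getLast hne ∈ x.toList := List.getLast_mem hne
        rw [List.getLast?_eq_some_getLast hne] at hc
        have := hall _ hmem
        exact pvAlpha_ne_space this (by injection hc)
      have : pvStepA res x = res ++ x.toList := by simp [pvStepA, hx]
      rw [List.foldl_cons, this, ih]
      have hflag : (decide ((res ++ x.toList) ≠ [] ∧
          PySem.List.pyGet? (res ++ x.toList) (-1) ≠ some ' ')) = true := by
        rw [pvGet_neg_one]
        simp only [decide_eq_true_eq]
        exact ⟨by simp [hne], hlast⟩
      rw [hflag]
      simp [pvRuns, hx]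
    · rw [Bool.not_eq_true] at hx
      by_cases hres : res ≠ [] ∧ PySem.List.pyGet? res (-1) ≠ some ' '
      · have : pvStepA res x = res ++ [' '] := by simp [pvStepA, hx, hres]
        rw [List.foldl_cons, this, ih]
        have hflag : (decide ((res ++ [' ']) ≠ [] ∧
            PySem.List.pyGet? (res ++ [' ']) (-1) ≠ some ' ')) = false := by
          rw [pvGet_neg_one]; simp
        rw [hflag]
        simp [pvRuns, hx, hres]
      · have : pvStepA res x = res := by simp [pvStepA, hx, hres]
        rw [List.foldl_cons, this, ih]
        simp only [decide_eq_false hres]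
        simp [pvRuns, hx]

lemma pvAlpha_not_space {c : Char} (h : PySem.Chars.isalpha c = true) :
    PySem.Chars.isspace c = false := by
  have h' := pvAlphaRange h
  simp only [PySem.Chars.isspace, Bool.or_eq_false_iff, Bool.and_eq_false_iff,
    decide_eq_false_iff_not, not_le]
  omega


lemma pvRuns_true_alpha_prefix (t : List String) (h : ∀ s ∈ t, PySem.Str.strIsalpha s = true) :
    ∀ rest, pvRuns true (t ++ rest) = t.flatMap String.toList ++ pvRuns true rest := by
  induction t with
  | nil => intro rest; simp
  | cons a l ih =>
    intro rest
    have ha := h a (by simp)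
    rw [PySem.Str.strIsalpha_eq] at ha
    simp only [List.cons_append, pvRuns, PySem.Str.strIsalpha_eq, ha, if_pos]
    rw [ih (fun s hs => h s (by simp [hs])) rest]
    simp

lemma pvRuns_false_drop (l : List String) :
    pvRuns false l = pvRuns true (l.dropWhile (fun s => !PySem.Str.strIsalpha s)) := by
  induction l with
  | nil => simp [pvRuns]
  | cons x xs ih =>
    by_cases hx : PySem.Chars.strIsalpha x.toList = true
    · simp [pvRuns, PySem.Str.strIsalpha_eq, hx]
    · rw [Bool.not_eq_true] at hx
      simp [pvRuns, PySem.Str.strIsalpha_eq, hx, ih]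

lemma pvRunsB_flat (l : List String) : (pvRunsB l).flatMap id = pvRuns true l := by
  induction l using pvRunsB.induct with
  | case1 => simp [pvRunsB, pvRuns]
  | case2 x xs hx ih =>
    have hall : ∀ s ∈ x :: xs.takeWhile (fun s => PySem.Str.strIsalpha s),
        PySem.Str.strIsalpha s = true := by
      intro s hs
      rcases List.mem_cons.mp hs with rfl | hs
      · exact hx
      · exact List.mem_takeWhile_imp hs
    rw [pvRunsB, if_pos hx]
    simp only [List.flatMap_cons, id]
    rw [ih]
    conv_rhs => rw [← List.takeWhile_append_dropWhile
      (p := fun s => PySem.Str.strIsalpha s) (l := xs)]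
    rw [show x :: (xs.takeWhile (fun s => PySem.Str.strIsalpha s)
        ++ xs.dropWhile (fun s => PySem.Str.strIsalpha s))
      = (x :: xs.takeWhile (fun s => PySem.Str.strIsalpha s))
        ++ xs.dropWhile (fun s => PySem.Str.strIsalpha s) by simp]
    rw [pvRuns_true_alpha_prefix _ hall]
    simp
  | case3 x xs hx ih =>
    rw [pvRunsB, if_neg hx]
    rw [Bool.not_eq_true, PySem.Str.strIsalpha_eq] at hx
    simp only [List.flatMap_cons, id]
    rw [ih]
    have h1 : pvRuns true (x :: xs) = ' ' :: pvRuns false xs := by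
      simp [pvRuns, PySem.Str.strIsalpha_eq, hx]
    rw [h1, pvRuns_false_drop]
    simp

lemma pvLstrip_runs_false (l : List String) :
    PySem.Chars.lstrip (pvRuns false l) = pvRuns false l := by
  induction l with
  | nil => simp [pvRuns, PySem.Chars.lstrip]
  | cons x xs ih =>
    by_cases hx : PySem.Chars.strIsalpha x.toList = true
    · have hx' := hx
      simp only [PySem.Chars.strIsalpha, Bool.and_eq_true, Bool.not_eq_eq_eq_not, Bool.not_true,
        List.isEmpty_eq_false_iff, List.all_eq_true] at hx'
      obtain ⟨hne, hall⟩ := hx'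
      cases hcs : x.toList with
      | nil => exact absurd hcs hne
      | cons c cs =>
        have hc : PySem.Chars.isalpha c = true := hall c (by rw [hcs]; simp)
        have hns := pvAlpha_not_space hc
        have h1 : pvRuns false (x :: xs) = x.toList ++ pvRuns true xs := by
          simp [pvRuns, PySem.Str.strIsalpha_eq, hx]
        rw [h1, hcs]
        simp only [PySem.Chars.lstrip, List.cons_append, List.dropWhile_cons, hns,
          Bool.false_eq_true, if_false]
    · rw [Bool.not_eq_true] at hx
      simp [pvRuns, PySem.Str.strIsalpha_eq, hx, ih]

lemma pvLstrip_runs_true (l : List String) :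
    PySem.Chars.lstrip (pvRuns true l) = pvRuns false l := by
  cases l with
  | nil => simp [pvRuns, PySem.Chars.lstrip]
  | cons x xs =>
    by_cases hx : PySem.Chars.strIsalpha x.toList = true
    · have h1 : pvRuns true (x :: xs) = pvRuns false (x :: xs) := by
        simp [pvRuns, PySem.Str.strIsalpha_eq, hx]
      rw [h1, pvLstrip_runs_false]
    · rw [Bool.not_eq_true] at hx
      simp only [pvRuns, PySem.Str.strIsalpha_eq, hx, Bool.false_eq_true, if_false, if_true]
      simp only [PySem.Chars.lstrip, List.dropWhile_cons]
      have h2 : PySem.Chars.isspace ' ' = true := by decide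
      simp only [h2, if_pos]
      exact pvLstrip_runs_false xs

theorem decrypt_matrix_spec : Claim_equal_decrypt_matrix := by
  intro matrix _ _
  unfold Spec_decrypt_matrix decrypt_matrix decrypt_matrix_alt
  apply congrArg String.ofList
  rw [pvRunsB_flat, pvLstrip_runs_true]
  have hA : ∀ (cells : List String), cells.foldl pvStepA [] = pvRuns false cells := by
    intro cells
    rw [pvFoldA]
    simp
  rw [← hA, List.foldl_flatMap]
  have hfun : ∀ (acc : List Char) (c : Int),
      (PySem.List.pyRange 0 (PySem.List.len matrix)).foldl
        (fun res r => pvStepA res (PySem.List.pyGetD (PySem.List.pyGetD matrix r []) c "")) acc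
      = (matrix.map (fun row => PySem.List.pyGetD row c "")).foldl pvStepA acc := by
    intro acc c
    rw [List.foldl_map]
    have h := PySem.List.foldl_pyRange_pyGetD matrix ([] : List String)
      (fun res row => pvStepA res (PySem.List.pyGetD row c "")) acc (a := 0) (by norm_num)
    simpa using h
  simp only [hfun]
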